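-- pv_equiv track=rewrite | github.com/moizkhurram/equation-calcuator | calc.py | DMAS_queue
-- ===== SOURCE A (Python) =====
-- def DMAS_queue(queue):
--     operators_queue=[]
--     for i in queue:
--         if i=='^':
--             operators_queue.append(i)
--     for i in queue:
--         if i=='/':
--             operators_queue.append(i)
--     for i in queue:
--         if i=='*':
--             operators_queue.append(i)
--     for i in queue:
--         if i=='+':
--             operators_queue.append(i)
--     for i in queue:
--         if i=='-':
--             operators_queue.append(i)
--     return operators_queue
-- ===== SOURCE B (Python) =====
-- def DMAS_queue(queue):
--     ops = [c for c in queue if c in ('^', '/', '*', '+', '-')]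
--     return sorted(ops, key=lambda c: '^/*+-'.index(c))
-- ===== Notes on version B (the rewrite author's own statement) =====
-- stated objective: simpler
-- what changed: Replaces five full scans of the queue (one per operator) with a single filter pass followed by a stable sort keyed by the operator's position in the precedence string '^/*+-'.
import Mathlib
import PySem

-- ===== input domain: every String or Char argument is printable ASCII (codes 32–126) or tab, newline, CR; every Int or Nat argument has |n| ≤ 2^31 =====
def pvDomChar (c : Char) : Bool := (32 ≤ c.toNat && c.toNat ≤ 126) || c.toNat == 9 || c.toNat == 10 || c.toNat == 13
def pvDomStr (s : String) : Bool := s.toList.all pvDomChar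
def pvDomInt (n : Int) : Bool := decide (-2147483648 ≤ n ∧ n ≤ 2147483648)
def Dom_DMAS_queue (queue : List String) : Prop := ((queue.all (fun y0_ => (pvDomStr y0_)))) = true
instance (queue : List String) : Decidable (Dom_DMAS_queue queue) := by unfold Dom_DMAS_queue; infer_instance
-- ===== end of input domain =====

-- B replaces A's five full scans of the queue with one filter pass plus a stable sort
-- keyed by the operator's position in the precedence string "^/*+-" (objective: simpler).


-- ===== PORT A =====
-- five separate passes over `queue`, appending the matching operator each time
def DMAS_queue (queue : List String) : List String :=
  let oq1 := queue.foldl (fun acc i => if i == "^" then acc ++ [i] else acc) []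
  let oq2 := queue.foldl (fun acc i => if i == "/" then acc ++ [i] else acc) oq1
  let oq3 := queue.foldl (fun acc i => if i == "*" then acc ++ [i] else acc) oq2
  let oq4 := queue.foldl (fun acc i => if i == "+" then acc ++ [i] else acc) oq3
  let oq5 := queue.foldl (fun acc i => if i == "-" then acc ++ [i] else acc) oq4
  oq5

-- ===== PORT B =====
-- one filter pass keeping the five operator symbols
def pvIsOp (c : String) : Bool :=
  c == "^" || c == "/" || c == "*" || c == "+" || c == "-"

-- stable sort keyed by position in the precedence string "^/*+-" ('.index' → PySem.Str.find,
-- identical on the members the key is applied to)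
def DMAS_queue_alt (queue : List String) : List String :=
  let ops := queue.filter pvIsOp
  PySem.List.sorted ops (fun c => PySem.Str.find "^/*+-" c)

-- ===== PRECONDITION & SPEC =====
def Spec_DMAS_queue (queue : List String) (out : List String) : Prop := out = DMAS_queue_alt queue
instance (queue : List String) (out : List String) : Decidable (Spec_DMAS_queue queue out) := by unfold Spec_DMAS_queue; infer_instance

-- ===== CLAIM (what is proved, stated in full; the proofs are below) =====
def Claim_equal_DMAS_queue : Prop := ∀ (queue : List String), Dom_DMAS_queue queue → Spec_DMAS_queue queue (DMAS_queue queue)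

-- ===== LEMMAS AND PROOFS =====

-- the key function of B's port
def pvKey (c : String) : Int := PySem.Str.find "^/*+-" c

-- inserting x between a prefix whose elements do not come strictly after x
-- and a suffix whose elements all do
theorem insertBy_between {α : Type} (before : α → α → Bool) (x : α) (l1 l2 : List α)
    (h1 : ∀ y ∈ l1, before x y = false) (h2 : ∀ y ∈ l2, before x y = true) :
    PySem.List.insertBy before x (l1 ++ l2) = l1 ++ x :: l2 := by
  induction l1 with
  | nil =>
    cases l2 with
    | nil => simp [PySem.List.insertBy]
    | cons h t => simp [PySem.List.insertBy, h2 h (by simp)]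
  | cons y ys ih =>
    have hy : before x y = false := h1 y (by simp)
    simp only [List.cons_append, PySem.List.insertBy, hy, Bool.false_eq_true, if_false]
    rw [ih (fun z hz => h1 z (by simp [hz]))]

-- bucket invariant for the insertion-sort foldl that PySem.List.sorted unfolds to
theorem buckets (xs : List String) :
    ∀ a b c d e : List String,
    (∀ y ∈ a, y = "^") → (∀ y ∈ b, y = "/") → (∀ y ∈ c, y = "*") →
    (∀ y ∈ d, y = "+") → (∀ y ∈ e, y = "-") →
    (∀ y ∈ xs, pvIsOp y = true) →
    xs.foldl (fun acc x => PySem.List.insertBy (fun u v => decide (pvKey u < pvKey v)) x acc)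
      (a ++ b ++ c ++ d ++ e)
    = (a ++ xs.filter (· == "^")) ++ (b ++ xs.filter (· == "/")) ++ (c ++ xs.filter (· == "*"))
      ++ (d ++ xs.filter (· == "+")) ++ (e ++ xs.filter (· == "-")) := by
  induction xs with
  | nil => intro a b c d e _ _ _ _ _ _; simp
  | cons x xs ih =>
    intro a b c d e ha hb hc hd he hx
    have hxop : pvIsOp x = true := hx x (by simp)
    have hxs : ∀ y ∈ xs, pvIsOp y = true := fun y hy => hx y (by simp [hy])
    have hcases : x = "^" ∨ x = "/" ∨ x = "*" ∨ x = "+" ∨ x = "-" := by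
      simp only [pvIsOp, Bool.or_eq_true, beq_iff_eq] at hxop
      tauto
    simp only [List.foldl_cons]
    rcases hcases with h | h | h | h | h <;> subst h
    · -- "^": goes to the front of bucket boundary a | b++c++d++e
      rw [show a ++ b ++ c ++ d ++ e = a ++ (b ++ c ++ d ++ e) by simp,
          insertBy_between _ _ a (b ++ c ++ d ++ e)
            (fun y hy => by rw [ha y hy]; decide)
            (fun y hy => by
              simp only [List.mem_append, or_assoc] at hy
              rcases hy with hy | hy | hy | hy
              · rw [hb y hy]; decide
              · rw [hc y hy]; decide
              · rw [hd y hy]; decide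
              · rw [he y hy]; decide),
          show a ++ "^" :: (b ++ c ++ d ++ e) = (a ++ ["^"]) ++ b ++ c ++ d ++ e by simp,
          ih (a ++ ["^"]) b c d e
            (fun y hy => by rcases List.mem_append.1 hy with hy | hy; exact ha y hy; simpa using hy)
            hb hc hd he hxs]
      simp
    · -- "/"
      rw [show a ++ b ++ c ++ d ++ e = (a ++ b) ++ (c ++ d ++ e) by simp,
          insertBy_between _ _ (a ++ b) (c ++ d ++ e)
            (fun y hy => by
              rcases List.mem_append.1 hy with hy | hy
              · rw [ha y hy]; decide
              · rw [hb y hy]; decide)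
            (fun y hy => by
              simp only [List.mem_append, or_assoc] at hy
              rcases hy with hy | hy | hy
              · rw [hc y hy]; decide
              · rw [hd y hy]; decide
              · rw [he y hy]; decide),
          show (a ++ b) ++ "/" :: (c ++ d ++ e) = a ++ (b ++ ["/"]) ++ c ++ d ++ e by simp,
          ih a (b ++ ["/"]) c d e ha
            (fun y hy => by rcases List.mem_append.1 hy with hy | hy; exact hb y hy; simpa using hy)
            hc hd he hxs]
      simp
    · -- "*"
      rw [show a ++ b ++ c ++ d ++ e = (a ++ b ++ c) ++ (d ++ e) by simp,
          insertBy_between _ _ (a ++ b ++ c) (d ++ e)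
            (fun y hy => by
              simp only [List.mem_append, or_assoc] at hy
              rcases hy with hy | hy | hy
              · rw [ha y hy]; decide
              · rw [hb y hy]; decide
              · rw [hc y hy]; decide)
            (fun y hy => by
              rcases List.mem_append.1 hy with hy | hy
              · rw [hd y hy]; decide
              · rw [he y hy]; decide),
          show (a ++ b ++ c) ++ "*" :: (d ++ e) = a ++ b ++ (c ++ ["*"]) ++ d ++ e by simp,
          ih a b (c ++ ["*"]) d e ha hb
            (fun y hy => by rcases List.mem_append.1 hy with hy | hy; exact hc y hy; simpa using hy)
            hd he hxs]
      simp
    · -- "+"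
      rw [show a ++ b ++ c ++ d ++ e = (a ++ b ++ c ++ d) ++ e by simp,
          insertBy_between _ _ (a ++ b ++ c ++ d) e
            (fun y hy => by
              simp only [List.mem_append, or_assoc] at hy
              rcases hy with hy | hy | hy | hy
              · rw [ha y hy]; decide
              · rw [hb y hy]; decide
              · rw [hc y hy]; decide
              · rw [hd y hy]; decide)
            (fun y hy => by rw [he y hy]; decide),
          show (a ++ b ++ c ++ d) ++ "+" :: e = a ++ b ++ c ++ (d ++ ["+"]) ++ e by simp,
          ih a b c (d ++ ["+"]) e ha hb hc
            (fun y hy => by rcases List.mem_append.1 hy with hy | hy; exact hd y hy; simpa using hy)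
            he hxs]
      simp
    · -- "-": goes to the very end
      rw [PySem.List.insertBy_of_forall_not_before _ _ _
            (fun y hy => by
              simp only [List.mem_append, or_assoc] at hy
              rcases hy with hy | hy | hy | hy | hy
              · rw [ha y hy]; decide
              · rw [hb y hy]; decide
              · rw [hc y hy]; decide
              · rw [hd y hy]; decide
              · rw [he y hy]; decide),
          show (a ++ b ++ c ++ d ++ e) ++ ["-"] = a ++ b ++ c ++ d ++ (e ++ ["-"]) by simp,
          ih a b c d (e ++ ["-"]) ha hb hc hd
            (fun y hy => by rcases List.mem_append.1 hy with hy | hy; exact he y hy; simpa using hy)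
            hxs]
      simp

-- filtering (· == s) commutes past the operator filter, for an operator s
theorem filter_op_filter (s : String) (hs : pvIsOp s = true) (l : List String) :
    (l.filter pvIsOp).filter (· == s) = l.filter (· == s) := by
  rw [List.filter_filter]
  apply List.filter_congr
  intro a _
  by_cases h : a = s
  · subst h; simp [hs]
  · simp [beq_false_of_ne h]

-- ===== VERDICT (by name: the statement is the Claim_ definition above) =====
theorem DMAS_queue_spec : Claim_equal_DMAS_queue := by
  intro queue _
  show DMAS_queue queue = DMAS_queue_alt queue
  have hA : DMAS_queue queue
      = queue.filter (· == "^") ++ queue.filter (· == "/") ++ queue.filter (· == "*")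
        ++ queue.filter (· == "+") ++ queue.filter (· == "-") := by
    simp only [DMAS_queue, PySem.List.foldl_append_if_eq_filter, List.nil_append,
      List.append_assoc]
  have hB : DMAS_queue_alt queue
      = (queue.filter pvIsOp).foldl
          (fun acc x => PySem.List.insertBy (fun u v => decide (pvKey u < pvKey v)) x acc) [] := by
    simp only [DMAS_queue_alt, PySem.List.sorted_eq_foldl_insertBy]; rfl
  rw [hA, hB,
      show ([] : List String) = [] ++ [] ++ [] ++ [] ++ [] by rfl,
      buckets (queue.filter pvIsOp) [] [] [] [] []
        (by simp) (by simp) (by simp) (by simp) (by simp)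
        (fun y hy => (List.mem_filter.1 hy).2)]
  simp [filter_op_filter "^" (by decide), filter_op_filter "/" (by decide),
        filter_op_filter "*" (by decide), filter_op_filter "+" (by decide),
        filter_op_filter "-" (by decide), List.append_assoc]
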